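-- pv_equiv track=rewrite | github.com/TDress/py-algorithms | bit_manip/flip_bit_to_win.py | flip_to_win
-- ===== SOURCE A (Python) =====
-- def flip_to_win(n):
--     is_flipped = longest = run = 0
--     last_off, mask = None, 1
--
--     for count in range(31):
--         if mask & n:
--             run += 1
--         elif not is_flipped:
--             last_off, is_flipped = count, 1
--             run += 1
--         else:
--             longest = max(longest, run)
--             run = count - last_off
--             last_off = count
--
--         mask <<= 1
--
--     return max(longest, run)
-- ===== SOURCE B (Python) =====
-- def lead_ones(bits):
--     c = 0
--     for b in bits:
--         if not b:
--             break
--         c += 1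
--     return c
--
--
-- def best_after(bits, left):
--     # best window over `bits` given `left` ones immediately precede it
--     if not bits:
--         return 0
--     b, rest = bits[0], bits[1:]
--     if b:
--         return best_after(rest, left + 1)
--     return max(left + 1 + lead_ones(rest), best_after(rest, 0))
--
--
-- def flip_to_win(n):
--     bits = [((1 << i) & n) != 0 for i in range(31)]
--     if all(bits):
--         return 31
--     return best_after(bits, 0)
-- ===== Notes on version B (the rewrite author's own statement) =====
-- stated objective: alternative
-- what changed: A's single-pass sliding window with flip bookkeeping (is_flipped/last_off/run) is replaced by a per-zero decomposition: B extracts the 31 bits once, and for each 0-bit takes ones-to-its-left + 1 + leading ones after it (recursively, with an inner lookahead), returning 31 when all bits are set.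
import Mathlib
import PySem

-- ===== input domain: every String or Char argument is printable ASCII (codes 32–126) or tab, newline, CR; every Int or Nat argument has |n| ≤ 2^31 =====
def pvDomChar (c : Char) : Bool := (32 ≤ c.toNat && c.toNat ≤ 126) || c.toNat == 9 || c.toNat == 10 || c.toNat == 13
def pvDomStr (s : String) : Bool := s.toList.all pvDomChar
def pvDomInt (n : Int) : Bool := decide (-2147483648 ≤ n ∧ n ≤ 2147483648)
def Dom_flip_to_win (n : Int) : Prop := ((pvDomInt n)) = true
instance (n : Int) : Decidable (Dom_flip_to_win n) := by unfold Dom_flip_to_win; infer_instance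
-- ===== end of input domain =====

-- B replaces A's one-pass flip-tracking sliding window by a per-zero decomposition
-- (for each 0-bit: ones to its left + 1 + leading ones after it); objective: alternative.

-- ===== PORT A =====
-- loop body of A's `for count in range(31)`; state = (is_flipped, longest, run, last_off, mask)
def aStep (n : Int) (st : Int × Int × Int × Option Int × Int) (count : Int) :
    Int × Int × Int × Option Int × Int :=
  match st with
  | (is_flipped, longest, run, last_off, mask) =>
    if Int.land mask n ≠ 0 then (is_flipped, longest, run + 1, last_off, mask <<< (1 : Int))
    else if is_flipped = 0 then (1, longest, run + 1, some count, mask <<< (1 : Int))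
    -- `last_off.getD 0`: in Python last_off is always an int on this branch (is_flipped ≠ 0)
    else (is_flipped, max longest run, count - last_off.getD 0, some count, mask <<< (1 : Int))

def flip_to_win (n : Int) : Int :=
  let st := (PySem.List.pyRange 0 31 1).foldl (aStep n) (0, 0, 0, none, 1)
  max st.2.1 st.2.2.1

-- ===== PORT B =====
-- hand port of Source B's `lead_ones` for/break loop: counts leading `true`s (exact)
def lead_ones : List Bool → Int
  | [] => 0
  | b :: bs => if b then lead_ones bs + 1 else 0

def best_after : List Bool → Int → Int
  | [], _ => 0
  | b :: rest, left =>
    if b then best_after rest (left + 1)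
    else max (left + 1 + lead_ones rest) (best_after rest 0)

def flip_to_win_alt (n : Int) : Int :=
  let bits := (List.range 31).map (fun (i : Nat) => decide (Int.land ((1 : Int) <<< ((i : Int))) n ≠ 0))
  if bits.all id then 31 else best_after bits 0

-- ===== PRECONDITION & SPEC =====
def Spec_flip_to_win (n : Int) (out : Int) : Prop := out = flip_to_win_alt n
instance (n : Int) (out : Int) : Decidable (Spec_flip_to_win n out) := by unfold Spec_flip_to_win; infer_instance

-- ===== CLAIM (what is proved, stated in full; the proofs are below) =====
def Claim_equal_flip_to_win : Prop := ∀ (n : Int), Dom_flip_to_win n → Spec_flip_to_win n (flip_to_win n)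

-- ===== LEMMAS AND PROOFS =====

-- the low bits of n as booleans, absolute positions j, j+1, …, j+m-1 (A's test order)
def bitsFrom (n : Int) (j m : Nat) : List Bool :=
  (List.range' j m).map (fun i => decide (Int.land (2 ^ i : Int) n ≠ 0))

-- A's loop as a machine over the bit list: state (flipped, longest, run, d) with
-- d = count - last_off maintained incrementally
def Acore : List Bool → Bool → Int → Int → Int → Int
  | [], _, L, r, _ => max L r
  | b :: bs, f, L, r, d =>
    if b then Acore bs f L (r + 1) (d + 1)
    else if !f then Acore bs true L (r + 1) 1
    else Acore bs true (max L r) d 1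

-- the flipped phase of Acore with the `longest` accumulator factored out
def Afree : List Bool → Int → Int → Int
  | [], r, _ => r
  | b :: bs, r, d => if b then Afree bs (r + 1) (d + 1) else max r (Afree bs d 1)

def finalMax (st : Int × Int × Int × Option Int × Int) : Int := max st.2.1 st.2.2.1

theorem lead_ones_nonneg : ∀ bs : List Bool, 0 ≤ lead_ones bs := by
  intro bs; induction bs with
  | nil => simp [lead_ones]
  | cons b bs ih => by_cases h : b = true <;> simp [lead_ones, h] <;> omega

theorem Acore_flipped (bs : List Bool) : ∀ (L r d : Int),
    Acore bs true L r d = max L (Afree bs r d) := by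
  induction bs with
  | nil => intro L r d; simp [Acore, Afree]
  | cons b bs ih =>
    intro L r d
    by_cases h : b = true
    · simp [Acore, Afree, h, ih]
    · simp only [Bool.not_eq_true] at h
      simp [Acore, Afree, h, ih, max_assoc]

theorem shl_one (a : Int) : a <<< (1 : Int) = a * 2 := by
  have h := Int.shiftLeft_eq_mul_pow a 1
  simpa using h

-- KEY: the flipped phase equals "current window so far" vs B's per-zero maximum
theorem Afree_eq_best (bs : List Bool) : ∀ (c k : Int), 0 ≤ c → 0 ≤ k →
    Afree bs (c + k + 1) (k + 1) = max (c + k + 1 + lead_ones bs) (best_after bs k) := by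
  induction bs with
  | nil =>
    intro c k hc hk
    simp only [Afree, lead_ones, best_after, add_zero]
    omega
  | cons b bs ih =>
    intro c k hc hk
    by_cases h : b = true
    · have h1 : c + k + 1 + 1 = c + (k + 1) + 1 := by ring
      have h2 : k + 1 + 1 = (k + 1) + 1 := rfl
      simp only [Afree, h, if_true, lead_ones, best_after]
      rw [h1, h2, ih c (k + 1) hc (by omega)]
      have h3 : c + (k + 1) + 1 + lead_ones bs = c + k + 1 + (lead_ones bs + 1) := by ring
      rw [h3]
    · simp only [Bool.not_eq_true] at h
      have hmid : Afree bs (k + 1) 1 = max (k + 1 + lead_ones bs) (best_after bs 0) := by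
        have := ih k 0 hk le_rfl
        simpa using this
      simp only [Afree, h, if_false, lead_ones, best_after, Bool.false_eq_true]
      rw [hmid]
      omega

theorem Acore_eq_alt (bs : List Bool) : ∀ (k d : Int), 0 ≤ k →
    Acore bs false 0 k d
      = if bs.all id then k + bs.length else best_after bs k := by
  induction bs with
  | nil => intro k d hk; simp [Acore]; omega
  | cons b bs ih =>
    intro k d hk
    by_cases h : b = true
    · simp only [Acore, h, if_true, List.all_cons, id, Bool.true_and, List.length_cons,
        best_after]
      rw [ih (k + 1) (d + 1) (by omega)]
      split_ifs with hall
      · push_cast; ring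
      · rfl
    · simp only [Bool.not_eq_true] at h
      have hfree : Afree bs (k + 1) 1 = max (k + 1 + lead_ones bs) (best_after bs 0) := by
        have := Afree_eq_best bs k 0 hk le_rfl
        simpa using this
      have hlead := lead_ones_nonneg bs
      simp only [Acore, h, if_false, Bool.not_false, if_true, List.all_cons, id,
        Bool.false_and, Bool.false_eq_true, best_after, Acore_flipped, hfree]
      omega

theorem bridge_flipped (m : Nat) : ∀ (j : Nat) (n L r z : Int),
    finalMax (((List.range' j m).map Int.ofNat).foldl (aStep n) (1, L, r, some z, 2 ^ j))
      = Acore (bitsFrom n j m) true L r ((j : Int) - z) := by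
  induction m with
  | zero => intro j n L r z; simp [finalMax, bitsFrom, Acore]
  | succ m ih =>
    intro j n L r z
    have hmask : ((2 : Int) ^ j) <<< (1 : Int) = 2 ^ (j + 1) := by rw [shl_one]; ring
    have hbits : bitsFrom n j (m + 1)
        = decide (Int.land ((2 : Int) ^ j) n ≠ 0) :: bitsFrom n (j + 1) m := by
      simp [bitsFrom, List.range'_succ]
    rw [List.range'_succ, List.map_cons, List.foldl_cons, hbits]
    simp only [Int.ofNat_eq_natCast]
    by_cases h : Int.land ((2 : Int) ^ j) n ≠ 0
    · have hstep : aStep n (1, L, r, some z, 2 ^ j) ((j : Nat) : Int)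
          = (1, L, r + 1, some z, 2 ^ (j + 1)) := by
        simp only [aStep]; rw [if_pos h, hmask]
      rw [hstep, decide_eq_true h, ih (j + 1) n L (r + 1) z]
      simp only [Acore, if_true]
      congr 1
      push_cast; ring
    · have hstep : aStep n (1, L, r, some z, 2 ^ j) ((j : Nat) : Int)
          = (1, max L r, (j : Int) - z, some ((j : Nat) : Int), 2 ^ (j + 1)) := by
        simp only [aStep]
        rw [if_neg h, if_neg (by norm_num : ¬(1 : Int) = 0), hmask]
        rfl
      rw [hstep, decide_eq_false h, ih (j + 1) n (max L r) ((j : Int) - z) ((j : Nat) : Int)]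
      simp only [Acore, Bool.false_eq_true, if_false, Bool.not_true]
      rw [show (((j + 1 : Nat) : Int)) - ((j : Nat) : Int) = 1 by push_cast; ring]

theorem bridge_unflipped (m : Nat) : ∀ (j : Nat) (n L r d : Int) (lo : Option Int),
    finalMax (((List.range' j m).map Int.ofNat).foldl (aStep n) (0, L, r, lo, 2 ^ j))
      = Acore (bitsFrom n j m) false L r d := by
  induction m with
  | zero => intro j n L r d lo; simp [finalMax, bitsFrom, Acore]
  | succ m ih =>
    intro j n L r d lo
    have hmask : ((2 : Int) ^ j) <<< (1 : Int) = 2 ^ (j + 1) := by rw [shl_one]; ring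
    have hbits : bitsFrom n j (m + 1)
        = decide (Int.land ((2 : Int) ^ j) n ≠ 0) :: bitsFrom n (j + 1) m := by
      simp [bitsFrom, List.range'_succ]
    rw [List.range'_succ, List.map_cons, List.foldl_cons, hbits]
    simp only [Int.ofNat_eq_natCast]
    by_cases h : Int.land ((2 : Int) ^ j) n ≠ 0
    · have hstep : aStep n (0, L, r, lo, 2 ^ j) ((j : Nat) : Int)
          = (0, L, r + 1, lo, 2 ^ (j + 1)) := by
        simp only [aStep]; rw [if_pos h, hmask]
      rw [hstep, decide_eq_true h, ih (j + 1) n L (r + 1) (d + 1) lo]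
      simp only [Acore, if_true]
    · have hstep : aStep n (0, L, r, lo, 2 ^ j) ((j : Nat) : Int)
          = (1, L, r + 1, some ((j : Nat) : Int), 2 ^ (j + 1)) := by
        simp only [aStep]
        rw [if_neg h]; simp [hmask]
      rw [hstep, decide_eq_false h, bridge_flipped m (j + 1) n L (r + 1) ((j : Nat) : Int)]
      simp only [Acore, Bool.false_eq_true, if_false, Bool.not_false, if_true]
      rw [show (((j + 1 : Nat) : Int)) - ((j : Nat) : Int) = 1 by push_cast; ring]

theorem pyRange31 : PySem.List.pyRange 0 31 1 = (List.range' 0 31).map Int.ofNat := by decide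

theorem bitsB_eq (n : Int) :
    (List.range 31).map (fun (i : Nat) => decide (Int.land ((1 : Int) <<< ((i : Int))) n ≠ 0))
      = bitsFrom n 0 31 := by
  rw [bitsFrom, List.range_eq_range']
  refine List.map_congr_left ?_
  intro i _
  have h1 : ((1 : Int) <<< (i : Int)) = (2 : Int) ^ i := by
    rw [Int.one_shiftLeft]; push_cast; ring
  rw [h1]

theorem flip_to_win_eq (n : Int) : flip_to_win n = flip_to_win_alt n := by
  have hb := bridge_unflipped 31 0 n 0 0 0 none
  rw [show ((2 : Int) ^ (0 : Nat)) = 1 by norm_num] at hb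
  have hA : flip_to_win n = Acore (bitsFrom n 0 31) false 0 0 0 := by
    rw [flip_to_win, pyRange31]
    exact hb
  have hB : flip_to_win_alt n
      = if (bitsFrom n 0 31).all id then (31 : Int) else best_after (bitsFrom n 0 31) 0 := by
    simp only [flip_to_win_alt, bitsB_eq n]
  have hlen : (bitsFrom n 0 31).length = 31 := by simp [bitsFrom]
  rw [hA, Acore_eq_alt (bitsFrom n 0 31) 0 0 le_rfl, hB, hlen]
  split_ifs <;> norm_num

-- ===== VERDICT (by name: the statement is the Claim_ definition above) =====
theorem flip_to_win_spec : Claim_equal_flip_to_win := by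
  intro n _
  unfold Spec_flip_to_win
  exact flip_to_win_eq n
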